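-- pv_equiv track=rewrite | github.com/mplaczek99/AI | Assignment 1/bidirectional-iddfs.py | bidirectional_iddfs
-- ===== SOURCE A (Python) =====
-- def bidirectional_iddfs(graph, start, goal):
--     """Perform a bidirectional Iterative Deepening Depth-First Search"""
--     depth = 0
--     total_call_count = 0 # Initialize call counter
--
--     while True:
--         visited_from_start = set()
--         visited_from_goal = set()
--         path_from_start = []
--         path_from_goal = []
--
--         # Perform two DLS from both directions
--         found_from_start, count_from_start = dls(graph, start, goal, depth, visited_from_start, path_from_start, 0, forward=True)
--         found_from_goal, count_from_goal = dls(graph, goal, start, depth, visited_from_goal, path_from_goal, 0, forward=False)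
--
--         total_call_count += (count_from_start + count_from_goal) # Aggregate the count of calls
--
--         # Check if there is an intersection
--         intersection = visited_from_start.intersection(visited_from_goal)
--         if intersection:
--             # Combine paths at the first common node
--             common_node = intersection.pop()
--             path_to_meet = path_from_start[:path_from_start.index(common_node) + 1]
--             path_from_meet = path_from_goal[:path_from_goal.index(common_node)]
--
--             return path_to_meet + path_from_meet[::-1], total_call_count
--
--         if found_from_start and found_from_goal:
--             return [], total_call_count  # One of the DLS found the goal, this shouldn't happen in a correct setup
--
--         depth += 1
--
-- def dls(graph, node, goal, depth, visited, path, call_count, forward):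
--     """Depth-Limited Search (DLS) for bidirectional search"""
--     call_count += 1
--
--     if node == goal:
--         path.append(node)
--         return True, call_count
--     if depth == 0:
--         return False, call_count
--
--     visited.add(node)
--     path.append(node)
--
--     for neighbor in graph[node]:
--         if neighbor not in visited:
--             found, call_count = dls(graph, neighbor, goal, depth - 1, visited, path, call_count, forward)
--             if found:
--                 return True, call_count
--
--     path.pop()
--     visited.remove(node)
--
--     return False, call_count
-- ===== SOURCE B (Python) =====
-- def bidirectional_iddfs(graph, start, goal):
--     """Bidirectional IDDFS; pure depth-limited search returning the path instead of mutating shared state."""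
--     depth = 0
--     total_call_count = 0
--     while True:
--         path_fwd, count_fwd = _limited_path(graph, start, goal, depth, ())
--         path_bwd, count_bwd = _limited_path(graph, goal, start, depth, ())
--         total_call_count += count_fwd + count_bwd
--         if path_fwd is not None and path_bwd is not None:
--             interior_bwd = set(path_bwd[:-1])
--             for i, node in enumerate(path_fwd[:-1]):
--                 if node in interior_bwd:
--                     return path_fwd[:i + 1] + path_bwd[:path_bwd.index(node)][::-1], total_call_count
--             return [], total_call_count
--         depth += 1
--
--
-- def _limited_path(graph, node, goal, depth, on_path):
--     """Depth-limited DFS avoiding the current path; returns (path from node to goal or None, number of calls)."""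
--     count = 1
--     if node == goal:
--         return [node], count
--     if depth == 0:
--         return None, count
--     on_path = on_path + (node,)
--     for neighbor in graph[node]:
--         if neighbor not in on_path:
--             sub, c = _limited_path(graph, neighbor, goal, depth - 1, on_path)
--             count += c
--             if sub is not None:
--                 return [node] + sub, count
--     return None, count
-- ===== Notes on version B (the rewrite author's own statement) =====
-- stated objective: alternative
-- what changed: The mutating depth-limited search (shared visited set + path list threaded through recursion, returning (found, call_count)) is replaced by a pure depth-limited DFS that carries only the current path and returns the found path itself as a value; the meeting node is then the first node of the forward path interior to the backward path, instead of popping it from a set intersection of the two visited sets.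
-- outside the precondition, e.g. on bidirectional_iddfs({'s': ['g', 'x'], 'g': ['s']}, 's', 'g'): A returns ([], 6), B returns ([], 6)
import Mathlib
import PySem

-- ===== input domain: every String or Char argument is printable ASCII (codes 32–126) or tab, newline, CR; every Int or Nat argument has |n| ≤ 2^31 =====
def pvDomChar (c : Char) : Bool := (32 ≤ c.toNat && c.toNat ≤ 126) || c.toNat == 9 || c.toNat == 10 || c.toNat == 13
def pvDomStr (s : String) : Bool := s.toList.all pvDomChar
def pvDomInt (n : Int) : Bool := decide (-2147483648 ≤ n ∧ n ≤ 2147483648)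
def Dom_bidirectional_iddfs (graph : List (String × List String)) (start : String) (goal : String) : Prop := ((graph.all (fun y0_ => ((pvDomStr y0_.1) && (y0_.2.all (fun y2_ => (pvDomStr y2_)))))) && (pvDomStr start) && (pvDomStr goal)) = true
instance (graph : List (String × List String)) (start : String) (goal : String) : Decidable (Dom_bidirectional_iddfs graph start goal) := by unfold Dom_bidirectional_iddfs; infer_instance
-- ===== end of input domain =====

-- B replaces A's mutating DLS (shared visited set + path list) by a pure DLS returning the path as a value; same traversal and call counts (objective: alternative decomposition, no speed claim).
-- A's `while True` is ported with a fuel guard (graph.length + 2 deepening rounds, enough for every input Pre_ admits); on inputs where Python A never returns, both ports return the same fuel-exhaustion value, so nothing is claimed there.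

-- ===== PORT A =====
mutual
  -- dls: `visited` is the Python set (PySem.Set, insertion order), `path` the shared list; state is threaded instead of mutated.
  def dlsA (graph : List (String × List String)) (node goal : String) (depth : Nat)
      (visited : PySem.Set String) (path : List String) (callCount : Int) (fwd : Bool) :
      Bool × Int × PySem.Set String × List String :=
    let callCount := callCount + 1
    if node == goal then
      (true, callCount, visited, path ++ [node])
    else
      match depth with
      | 0 => (false, callCount, visited, path)
      | Nat.succ d =>
        let visited1 := PySem.Set.add visited node
        let path1 := path ++ [node]
        -- `for neighbor in graph[node]` — graph[node] raises KeyError when node is no key; Pre_ keeps such runs out, the port reads [] there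
        match dlsNeighborsA graph goal d ((PySem.Dict.get? (PySem.Dict.mk graph) node).getD []) visited1 path1 callCount fwd with
        | (true, cc, v, p) => (true, cc, v, p)
        -- after the loop: path.pop(); visited.remove(node) — node is always present, so Set.discard is Python's .remove here
        | (false, cc, v, p) => (false, cc, PySem.Set.discard v node, p.dropLast)
  termination_by (depth, 1, 0)

  def dlsNeighborsA (graph : List (String × List String)) (goal : String) (d : Nat)
      (nbs : List String) (visited : PySem.Set String) (path : List String) (callCount : Int) (fwd : Bool) :
      Bool × Int × PySem.Set String × List String :=
    match nbs with
    | [] => (false, callCount, visited, path)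
    | nb :: rest =>
      if PySem.Set.contains visited nb then
        dlsNeighborsA graph goal d rest visited path callCount fwd
      else
        match dlsA graph nb goal d visited path callCount fwd with
        | (true, cc, v, p) => (true, cc, v, p)
        | (false, cc, v, p) => dlsNeighborsA graph goal d rest v p cc fwd
  termination_by (d + 1, 0, nbs.length)
end

def iddfsLoopA (graph : List (String × List String)) (start goal : String) :
    Nat → Nat → Int → List String × Int
  | _, 0, total => ([], total)  -- fuel guard for `while True` (see header comment)
  | depth, Nat.succ fuel, total =>
    match dlsA graph start goal depth PySem.Set.empty [] 0 true,
          dlsA graph goal start depth PySem.Set.empty [] 0 false with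
    | (foundS, cS, vS, pS), (foundG, cG, vG, pG) =>
      let total := total + (cS + cG)
      -- intersection.pop(): CPython pops in hash order; deterministic exactly when the intersection has at most one element,
      -- which is what Pre_ admits; determinized here to the first element in visited_from_start's insertion order
      match PySem.Set.inter vS vG with
      | common :: _ =>
        let i := (PySem.List.index? pS common).getD 0
        let j := (PySem.List.index? pG common).getD 0
        let pathToMeet := PySem.List.slice pS none (some ((i : Int) + 1))
        let pathFromMeet := PySem.List.slice pG none (some (j : Int))
        (pathToMeet ++ ((PySem.List.slice? pathFromMeet none none (-1)).getD []), total)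
      | [] =>
        if foundS && foundG then ([], total)
        else iddfsLoopA graph start goal (depth + 1) fuel total

def bidirectional_iddfs (graph : List (String × List String)) (start : String) (goal : String) : List String × Int :=
  iddfsLoopA graph start goal 0 (graph.length + 2) 0

-- ===== PORT B =====
mutual
  -- pure depth-limited DFS: carries only the nodes on the current path, returns (optional path to goal, number of calls)
  def lpSearchB (graph : List (String × List String)) (node goal : String) (depth : Nat)
      (onPath : List String) : Option (List String) × Int :=
    if node == goal then (some [node], 1)
    else
      match depth with
      | 0 => (none, 1)
      | Nat.succ d =>
        lpNeighborsB graph goal d (onPath ++ [node]) node ((PySem.Dict.get? (PySem.Dict.mk graph) node).getD []) 1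
  termination_by (depth, 1, 0)

  def lpNeighborsB (graph : List (String × List String)) (goal : String) (d : Nat)
      (onPath : List String) (node : String) (nbs : List String) (count : Int) :
      Option (List String) × Int :=
    match nbs with
    | [] => (none, count)
    | nb :: rest =>
      if nb ∈ onPath then lpNeighborsB graph goal d onPath node rest count
      else
        match lpSearchB graph nb goal d onPath with
        | (some sub, c) => (some (node :: sub), count + c)
        | (none, c) => lpNeighborsB graph goal d onPath node rest (count + c)
  termination_by (d + 1, 0, nbs.length)
end

-- first node of the forward-path interior that lies on the backward-path interior, with the merged path
def mergeFirstB (pf pb : List String) (interiorB : PySem.Set String) :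
    List String → Nat → Option (List String)
  | [], _ => none
  | x :: rest, i =>
    if PySem.Set.contains interiorB x then
      some (pf.take (i + 1) ++ (pb.take ((PySem.List.index? pb x).getD 0)).reverse)
    else mergeFirstB pf pb interiorB rest (i + 1)

def iddfsLoopB (graph : List (String × List String)) (start goal : String) :
    Nat → Nat → Int → List String × Int
  | _, 0, total => ([], total)  -- fuel guard for `while True` (see header comment)
  | depth, Nat.succ fuel, total =>
    match lpSearchB graph start goal depth [], lpSearchB graph goal start depth [] with
    | (pfO, cf), (pbO, cb) =>
      let total := total + cf + cb
      match pfO, pbO with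
      | some pf, some pb =>
        (match mergeFirstB pf pb (PySem.Set.ofList pb.dropLast) pf.dropLast 0 with
         | some merged => (merged, total)
         | none => ([], total))
      | _, _ => iddfsLoopB graph start goal (depth + 1) fuel total

def bidirectional_iddfs_alt (graph : List (String × List String)) (start : String) (goal : String) : List String × Int :=
  iddfsLoopB graph start goal 0 (graph.length + 2) 0

-- ===== PRECONDITION & SPEC =====
-- Helpers for Pre_ only: closed-form graph properties (reachability closure, shortest distance); they reach neither port.
def pvAdj (graph : List (String × List String)) (x : String) : List String :=
  (PySem.Dict.get? (PySem.Dict.mk graph) x).getD []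
def pvIsKey (graph : List (String × List String)) (x : String) : Bool :=
  (PySem.Dict.get? (PySem.Dict.mk graph) x).isSome
-- one expansion step of the reachable-node closure
def pvStep (graph : List (String × List String)) (seen : List String) : List String :=
  seen.foldl (fun acc u => (pvAdj graph u).foldl (fun a v => if a.contains v then a else a ++ [v]) acc) seen
-- all nodes reachable from x (graph.length + 1 rounds reach the fixpoint)
def pvReach (graph : List (String × List String)) (x : String) : List String :=
  Nat.iterate (pvStep graph) (graph.length + 1) [x]
-- y within k hops of x
def pvDistLe (graph : List (String × List String)) (x y : String) (k : Nat) : Bool :=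
  (Nat.iterate (pvStep graph) k [x]).contains y
-- shortest-path distance from x to y (none if unreachable)
def pvDist? (graph : List (String × List String)) (x y : String) : Option Nat :=
  (List.range (graph.length + 2)).find? (fun k => pvDistLe graph x y k)
-- the nodes u ∉ {s, g} that could be a meeting node of the two depth-D searches:
-- u must lie on a ≤ D-hop route s→g and on a ≤ D-hop route g→s
def pvMeetCands (graph : List (String × List String)) (s g : String) (D : Nat) : List String :=
  (PySem.Set.ofList (graph.map (·.1))).filter (fun u =>
    !(u == s) && !(u == g) &&
    (match pvDist? graph s u, pvDist? graph u g, pvDist? graph g u, pvDist? graph u s with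
     | some a, some b, some c, some d => decide (a + b ≤ D) && decide (c + d ≤ D)
     | _, _, _, _ => false))
-- Pre_ admits: start = goal, or a graph closed over everything reachable from start and goal, with start and goal mutually
-- reachable (distances d1, d2), where at most ONE node can be a meeting node of the two depth-max(d1,d2) searches — then the
-- set intersection A pops from has at most one element and A is deterministic. EXCLUDED although A may still return:
-- (a) inputs with ≥ 2 possible meeting candidates — there A's intersection.pop() follows CPython's randomized string-hash
-- order, so A's path is nondeterministic in general (and only accidentally stable on symmetric graphs); and (b) inputs where
-- a node without a graph entry is reachable — there A in general raises KeyError, though it may return if the search never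
-- touches that node. Inputs where start and goal are not mutually reachable make A loop forever (no value to match).
def pvPreB (graph : List (String × List String)) (start goal : String) : Bool :=
  start == goal ||
    ((pvReach graph start ++ pvReach graph goal).all (pvIsKey graph) &&
      (match pvDist? graph start goal, pvDist? graph goal start with
       | some d1, some d2 => decide ((pvMeetCands graph start goal (max d1 d2)).length ≤ 1)
       | _, _ => false))
def Pre_bidirectional_iddfs (graph : List (String × List String)) (start : String) (goal : String) : Prop :=
  pvPreB graph start goal = true
instance (graph : List (String × List String)) (start : String) (goal : String) : Decidable (Pre_bidirectional_iddfs graph start goal) := by unfold Pre_bidirectional_iddfs; infer_instance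

def pvWitness_bidirectional_iddfs : (List (String × List String)) × String × String :=
  ([("a", ["b"]), ("b", ["a"])], "a", "b")

def Spec_bidirectional_iddfs (graph : List (String × List String)) (start : String) (goal : String) (out : List String × Int) : Prop := out = bidirectional_iddfs_alt graph start goal
instance (graph : List (String × List String)) (start : String) (goal : String) (out : List String × Int) : Decidable (Spec_bidirectional_iddfs graph start goal out) := by unfold Spec_bidirectional_iddfs; infer_instance

-- ===== CLAIM (what is proved, stated in full; the proofs are below) =====
def Claim_equal_bidirectional_iddfs : Prop := ∀ (graph : List (String × List String)) (start : String) (goal : String), Dom_bidirectional_iddfs graph start goal → Pre_bidirectional_iddfs graph start goal → Spec_bidirectional_iddfs graph start goal (bidirectional_iddfs graph start goal)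

-- ===== LEMMAS AND PROOFS =====

-- removing the freshly appended node restores the visited list
theorem pv_filter_ne_concat (l : List String) (x : String) (hn : x ∉ l) :
    List.filter (fun y => !(y == x)) (l ++ [x]) = l := by
  simp only [List.filter_append]
  have h1 : List.filter (fun y => !(y == x)) l = l := by
    apply List.filter_eq_self.mpr
    intro a ha
    simp only [Bool.not_eq_eq_eq_not, Bool.not_true, beq_eq_false_iff_ne, ne_eq]
    intro h; exact hn (h ▸ ha)
  have h2 : List.filter (fun y => !(y == x)) [x] = [] := by simp
  rw [h1, h2, List.append_nil]

theorem pv_contains_ofList (l : List String) (x : String) :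
    PySem.Set.contains (PySem.Set.ofList l) x = l.contains x := by
  have := PySem.Set.mem_ofList l x
  by_cases h : x ∈ l <;> simp [PySem.Set.contains, this, h]

theorem pv_nodup_concat (l : List String) (x : String) (hn : x ∉ l) (hnd : l.Nodup) :
    (l ++ [x]).Nodup := by
  simpa [List.nodup_append] using ⟨hnd, fun a ha e => hn (e ▸ ha)⟩

-- B's neighbour loop is additive in its count accumulator.
theorem lpNeighborsB_count_add (graph : List (String × List String)) (goal : String) (d : Nat)
    (onPath : List String) (node : String) (nbs : List String) (count : Int) :
    lpNeighborsB graph goal d onPath node nbs count =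
      ((lpNeighborsB graph goal d onPath node nbs 0).1,
        count + (lpNeighborsB graph goal d onPath node nbs 0).2) := by
  induction nbs generalizing count with
  | nil => simp [lpNeighborsB]
  | cons nb rest ih =>
    simp only [lpNeighborsB]
    by_cases hmem : nb ∈ onPath
    · simp only [if_pos hmem]
      exact ih count
    · simp only [if_neg hmem]
      cases hs : lpSearchB graph nb goal d onPath with
      | mk sub? c =>
        cases sub? with
        | some sub => simp
        | none =>
          simp only
          rw [ih (count + c), ih (0 + c)]
          simp [Int.add_assoc]

-- a successful pure search returns a nonempty path starting at its node (properly longer unless node is the goal),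
-- and the whole stack stays duplicate-free
theorem lpSearchB_shape (graph : List (String × List String)) (goal : String) :
    ∀ (d : Nat) (node : String) (onPath p : List String) (c : Int),
      node ∉ onPath → onPath.Nodup →
      lpSearchB graph node goal d onPath = (some p, c) →
      (∃ t, p = node :: t ∧ (node ≠ goal → t ≠ [])) ∧ (onPath ++ p).Nodup := by
  intro d
  induction d with
  | zero =>
    intro node onPath p c hn hnd h
    by_cases hg : node == goal
    · simp only [lpSearchB, if_pos hg, Prod.mk.injEq, Option.some.injEq] at h
      refine ⟨⟨[], h.1.symm, fun hne => absurd (by simpa using hg) hne⟩, ?_⟩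
      rw [← h.1]
      exact pv_nodup_concat onPath node hn hnd
    · simp [lpSearchB, hg] at h
  | succ d ihd =>
    intro node onPath p c hn hnd h
    by_cases hg : node == goal
    · simp only [lpSearchB, if_pos hg, Prod.mk.injEq, Option.some.injEq] at h
      refine ⟨⟨[], h.1.symm, fun hne => absurd (by simpa using hg) hne⟩, ?_⟩
      rw [← h.1]
      exact pv_nodup_concat onPath node hn hnd
    · have hnd1 : (onPath ++ [node]).Nodup := pv_nodup_concat onPath node hn hnd
      simp only [lpSearchB, if_neg hg] at h
      have inner : ∀ (nbs : List String) (count : Int) (p : List String) (c : Int),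
          lpNeighborsB graph goal d (onPath ++ [node]) node nbs count = (some p, c) →
          (∃ t, p = node :: t ∧ t ≠ []) ∧ (onPath ++ p).Nodup := by
        intro nbs
        induction nbs with
        | nil => intro count p c h; simp [lpNeighborsB] at h
        | cons nb rest ihl =>
          intro count p c h
          simp only [lpNeighborsB] at h
          by_cases hmem : nb ∈ onPath ++ [node]
          · rw [if_pos hmem] at h
            exact ihl _ _ _ h
          · rw [if_neg hmem] at h
            cases hs : lpSearchB graph nb goal d (onPath ++ [node]) with
            | mk sub? c' =>
              cases sub? with
              | some sub =>
                rw [hs] at h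
                simp only [Prod.mk.injEq, Option.some.injEq] at h
                obtain ⟨⟨t', hsub, _⟩, hnd2⟩ := ihd nb (onPath ++ [node]) sub c' hmem hnd1 hs
                refine ⟨⟨sub, h.1.symm, by simp [hsub]⟩, ?_⟩
                rw [← h.1]
                simpa [List.append_assoc] using hnd2
              | none =>
                rw [hs] at h
                exact ihl _ _ _ h
      obtain ⟨⟨t, hp, ht⟩, hnd2⟩ := inner _ _ _ _ h
      exact ⟨⟨t, hp, fun _ => ht⟩, hnd2⟩

-- MAIN: A's mutating DLS computes exactly B's pure DLS (visited list = the path stack, path = prefix ++ found path)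
theorem dlsA_eq_lpSearchB (graph : List (String × List String)) (goal : String) (fwd : Bool) :
    ∀ (d : Nat) (node : String) (onPath path : List String) (cc : Int),
      node ∉ onPath → onPath.Nodup →
      dlsA graph node goal d onPath path cc fwd =
        (match lpSearchB graph node goal d onPath with
         | (some p, c) => (true, cc + c, onPath ++ p.dropLast, path ++ p)
         | (none, c) => (false, cc + c, onPath, path)) := by
  intro d
  induction d with
  | zero =>
    intro node onPath path cc hn hnd
    by_cases hg : node == goal
    · simp [dlsA, lpSearchB, hg]
    · simp [dlsA, lpSearchB, hg]
  | succ d ihd =>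
    intro node onPath path cc hn hnd
    by_cases hg : node == goal
    · simp [dlsA, lpSearchB, hg]
    · have hcont : PySem.Set.contains onPath node = false := by
        simp only [PySem.Set.contains]
        simpa using hn
      have hnd1 : (onPath ++ [node]).Nodup := pv_nodup_concat onPath node hn hnd
      have hadd : PySem.Set.add onPath node = onPath ++ [node] := by
        simp [PySem.Set.add, PySem.Set.contains, hn]
      have inner : ∀ (nbs : List String) (path' : List String) (cc' : Int),
          dlsNeighborsA graph goal d nbs (onPath ++ [node]) path' cc' fwd =
            (match lpNeighborsB graph goal d (onPath ++ [node]) node nbs 0 with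
             | (some p, c) => (true, cc' + c, (onPath ++ [node]) ++ (p.drop 1).dropLast, path' ++ p.drop 1)
             | (none, c) => (false, cc' + c, onPath ++ [node], path')) := by
        intro nbs
        induction nbs with
        | nil => intro path' cc'; simp [dlsNeighborsA, lpNeighborsB]
        | cons nb rest ihl =>
          intro path' cc'
          by_cases hmem : nb ∈ onPath ++ [node]
          · have hc : PySem.Set.contains (onPath ++ [node]) nb = true := by
              simp only [PySem.Set.contains]
              simpa using hmem
            simp only [dlsNeighborsA, lpNeighborsB, hc, if_pos hmem, if_true]
            exact ihl path' cc'
          · have hc : PySem.Set.contains (onPath ++ [node]) nb = false := by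
              simp only [PySem.Set.contains]
              simpa using hmem
            simp only [dlsNeighborsA, lpNeighborsB, hc, if_neg hmem, Bool.false_eq_true, if_false]
            rw [ihd nb (onPath ++ [node]) path' cc' hmem hnd1]
            cases hs : lpSearchB graph nb goal d (onPath ++ [node]) with
            | mk sub? c' =>
              cases sub? with
              | some sub => simp
              | none =>
                simp only
                rw [ihl path' (cc' + c')]
                rw [lpNeighborsB_count_add graph goal d (onPath ++ [node]) node rest (0 + c')]
                cases hr : lpNeighborsB graph goal d (onPath ++ [node]) node rest 0 with
                | mk res? c'' =>
                  cases res? with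
                  | some p => simp [Int.add_assoc]
                  | none => simp [Int.add_assoc]
      -- assemble the two bodies
      simp only [dlsA, lpSearchB, if_neg hg, hadd]
      rw [inner ((PySem.Dict.get? (PySem.Dict.mk graph) node).getD []) (path ++ [node]) (cc + 1)]
      rw [lpNeighborsB_count_add graph goal d (onPath ++ [node]) node
            ((PySem.Dict.get? (PySem.Dict.mk graph) node).getD []) 1]
      cases hr : lpNeighborsB graph goal d (onPath ++ [node]) node
          ((PySem.Dict.get? (PySem.Dict.mk graph) node).getD []) 0 with
      | mk res? c =>
        cases res? with
        | some p =>
          have hsearch : lpSearchB graph node goal (d + 1) onPath = (some p, 1 + c) := by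
            simp only [lpSearchB, if_neg hg]
            rw [lpNeighborsB_count_add graph goal d (onPath ++ [node]) node
                  ((PySem.Dict.get? (PySem.Dict.mk graph) node).getD []) 1, hr]
          obtain ⟨⟨t, hp, ht⟩, _⟩ :=
            lpSearchB_shape graph goal (d + 1) node onPath p (1 + c) hn hnd hsearch
          have ht' : t ≠ [] := ht (by simpa using hg)
          cases t with
          | nil => exact absurd rfl ht'
          | cons t0 ts =>
            subst hp
            simp [Int.add_assoc, List.dropLast_cons₂, List.append_assoc]
        | none =>
          simp only [PySem.Set.discard]
          rw [pv_filter_ne_concat onPath node hn, List.dropLast_concat]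
          simp [Int.add_assoc]

-- B's merge scan equals A's take-at-first-intersection computation
theorem mergeFirstB_eq (pf pb : List String) (hnf : pf.Nodup) :
    ∀ (rest pre : List String), pf.dropLast = pre ++ rest →
    mergeFirstB pf pb (PySem.Set.ofList pb.dropLast) rest pre.length =
      (rest.find? (fun x => PySem.Set.contains (PySem.Set.ofList pb.dropLast) x)).map
        (fun x => pf.take ((PySem.List.index? pf x).getD 0 + 1) ++
          (pb.take ((PySem.List.index? pb x).getD 0)).reverse) := by
  intro rest
  induction rest with
  | nil => intro pre hpre; simp [mergeFirstB]
  | cons x rest' ih =>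
    intro pre hpre
    by_cases hc : PySem.Set.contains (PySem.Set.ofList pb.dropLast) x
    · have hidx : PySem.List.index? pf x = some pre.length := by
        have hne : pf ≠ [] := by
          intro h0
          rw [h0] at hpre
          simp at hpre
        have hpf : pf = pre ++ x :: (rest' ++ [pf.getLast hne]) := by
          conv_lhs => rw [← List.dropLast_concat_getLast hne]
          rw [hpre]
          simp
        have hxpre : x ∉ pre := by
          have := hpf ▸ hnf
          simp [List.nodup_append] at this
          intro hx
          exact (this.2.2 x hx).1 rfl
        rw [PySem.List.index?_eq_some_iff]
        exact ⟨pre, rest' ++ [pf.getLast hne], hpf, rfl, hxpre⟩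
      simp only [mergeFirstB, if_pos hc, List.find?_cons_of_pos hc, Option.map_some, hidx,
        Option.getD_some]
    · have hxm : x ∉ pb.dropLast := by simpa using hc
      have hpx : (fun y => PySem.Set.contains (PySem.Set.ofList pb.dropLast) y) x = false := by
        simpa using hc
      rw [List.find?_cons_of_neg (by simp [hxm])]
      simp only [mergeFirstB]
      rw [if_neg (by simp [hxm])]
      have := ih (pre ++ [x]) (by rw [hpre]; simp)
      simpa [List.length_append] using this

theorem iddfsLoop_eq (graph : List (String × List String)) (start goal : String) :
    ∀ (fuel depth : Nat) (total : Int),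
      iddfsLoopA graph start goal depth fuel total = iddfsLoopB graph start goal depth fuel total := by
  intro fuel
  induction fuel with
  | zero => intro depth total; simp [iddfsLoopA, iddfsLoopB]
  | succ fuel ih =>
    intro depth total
    have hA := dlsA_eq_lpSearchB graph goal true depth start [] [] 0 (by simp) (by simp)
    have hB := dlsA_eq_lpSearchB graph start false depth goal [] [] 0 (by simp) (by simp)
    simp only [iddfsLoopA, iddfsLoopB, PySem.Set.empty]
    rw [hA, hB]
    cases hf : lpSearchB graph start goal depth [] with
    | mk pf? cf =>
      cases hb : lpSearchB graph goal start depth [] with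
      | mk pb? cb =>
        cases pf? with
        | none =>
          cases pb? with
          | none =>
            simp only [PySem.Set.inter, PySem.Set.contains, List.filter_nil, Bool.and_self,
              Bool.false_eq_true, if_false]
            rw [show total + (0 + cf + (0 + cb)) = total + cf + cb by omega]
            exact ih (depth + 1) (total + cf + cb)
          | some pb =>
            simp only [List.nil_append, PySem.Set.inter, PySem.Set.contains, List.filter_nil,
              Bool.false_and]
            rw [show total + (0 + cf + (0 + cb)) = total + cf + cb by omega]
            exact ih (depth + 1) (total + cf + cb)
        | some pf =>
          cases pb? with
          | none =>
            have hinter : PySem.Set.inter (([] : List String) ++ pf.dropLast) ([] : List String) = [] := by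
              simp [PySem.Set.inter, PySem.Set.contains]
            simp only [List.nil_append] at hinter
            simp only [List.nil_append, hinter, Bool.and_false]
            rw [show total + (0 + cf + (0 + cb)) = total + cf + cb by omega]
            exact ih (depth + 1) (total + cf + cb)
          | some pb =>
            have hnf : pf.Nodup := by
              have h2 := (lpSearchB_shape graph goal depth start [] pf cf (by simp) (by simp) hf).2
              simpa using h2
            have hmerge := mergeFirstB_eq pf pb hnf pf.dropLast [] (by simp)
            have hPP : (fun x => PySem.Set.contains (PySem.Set.ofList pb.dropLast) x)
                = fun x => List.contains pb.dropLast x := funext (pv_contains_ofList pb.dropLast)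
            rw [hPP] at hmerge
            simp only [List.length_nil] at hmerge
            simp only [List.nil_append, PySem.Set.inter, PySem.Set.contains, hmerge]
            cases hfind : List.find? (fun x => List.contains pb.dropLast x) pf.dropLast with
            | none =>
              have hfil : List.filter (fun x => List.contains pb.dropLast x) pf.dropLast = [] := by
                have hh : (List.filter (fun x => List.contains pb.dropLast x) pf.dropLast).head?
                    = List.find? (fun x => List.contains pb.dropLast x) pf.dropLast :=
                  List.head?_filter
                rw [hfind] at hh
                cases hl : List.filter (fun x => List.contains pb.dropLast x) pf.dropLast with
                | nil => rfl
                | cons a l => rw [hl] at hh; simp at hh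
              rw [hfil]
              simp only [Option.map_none, Bool.and_self, if_true]
              rw [show total + (0 + cf + (0 + cb)) = total + cf + cb by omega]
            | some cmn =>
              have hh : (List.filter (fun x => List.contains pb.dropLast x) pf.dropLast).head?
                  = List.find? (fun x => List.contains pb.dropLast x) pf.dropLast :=
                List.head?_filter
              rw [hfind] at hh
              cases hfil : List.filter (fun x => List.contains pb.dropLast x) pf.dropLast with
              | nil => rw [hfil] at hh; simp at hh
              | cons c0 tl =>
                rw [hfil] at hh
                simp only [List.head?_cons, Option.some.injEq] at hh
                subst hh
                simp only [Option.map_some]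
                have hs1 : PySem.List.slice pf none
                    (some (((PySem.List.index? pf c0).getD 0 : Nat) + 1 : Int)) =
                    pf.take ((PySem.List.index? pf c0).getD 0 + 1) := by
                  rw [show (((PySem.List.index? pf c0).getD 0 : Nat) + 1 : Int)
                        = ((((PySem.List.index? pf c0).getD 0 + 1 : Nat)) : Int) by push_cast; ring]
                  exact PySem.List.slice_to_natCast pf _
                have hs2 : PySem.List.slice pb none
                    (some (((PySem.List.index? pb c0).getD 0 : Nat) : Int)) =
                    pb.take ((PySem.List.index? pb c0).getD 0) := by
                  exact PySem.List.slice_to_natCast pb _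
                rw [hs1, hs2, PySem.List.slice?_none_none_neg_one]
                simp only [Option.getD_some, Prod.mk.injEq, true_and]
                omega

-- ===== VERDICT (by name: the statement is the Claim_ definition above) =====
theorem bidirectional_iddfs_spec : Claim_equal_bidirectional_iddfs := by
  intro graph start goal _ _
  unfold Spec_bidirectional_iddfs bidirectional_iddfs bidirectional_iddfs_alt
  exact iddfsLoop_eq graph start goal (graph.length + 2) 0 0
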